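-- pv_equiv track=rewrite | github.com/mhofherr/TaskPaperManager | tpm/tpm.py | checkSanity
-- ===== SOURCE A (Python) =====
-- def checkSanity(line):
--     """performs some sanity check on task line
--
--     :param line: the content of the task
--     :return: true if check throws no errrors
--     """
--
--     if '@prio' not in line or '@start' not in line:
--         return False
--
--     # check brackets
--     iparens = iter('()')
--     parens = dict(zip(iparens, iparens))
--     closing = parens.values()
--
--     stack = []
--     for c in line:
--         d = parens.get(c, None)
--         if d:
--             stack.append(d)
--         elif c in closing:
--             if not stack or c != stack.pop():
--                 return False
--     return not stack
-- ===== SOURCE B (Python) =====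
-- def checkSanity(line):
--     """Same check as A, but with a single integer depth counter instead of a dict+stack."""
--     if '@prio' not in line or '@start' not in line:
--         return False
--     balance = 0
--     for c in line:
--         if c == '(':
--             balance += 1
--         elif c == ')':
--             if balance == 0:
--                 return False
--             balance -= 1
--     return balance == 0
-- ===== Notes on version B (the rewrite author's own statement) =====
-- stated objective: simpler
-- what changed: Replaced the dict-of-brackets plus explicit stack of expected closers with a single integer depth counter (possible exactly because only one bracket type occurs), keeping the tag-substring guard.
import Mathlib
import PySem

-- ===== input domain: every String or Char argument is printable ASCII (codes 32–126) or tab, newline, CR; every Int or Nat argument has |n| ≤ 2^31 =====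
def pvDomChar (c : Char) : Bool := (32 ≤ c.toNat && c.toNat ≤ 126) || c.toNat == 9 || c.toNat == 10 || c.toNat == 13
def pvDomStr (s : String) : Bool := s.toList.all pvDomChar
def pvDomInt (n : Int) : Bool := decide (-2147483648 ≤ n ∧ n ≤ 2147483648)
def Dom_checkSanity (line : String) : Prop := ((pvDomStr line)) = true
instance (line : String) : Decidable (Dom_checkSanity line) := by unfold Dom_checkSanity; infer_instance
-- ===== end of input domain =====

-- B replaces A's dict+stack bracket machinery with a single integer depth counter (simpler; only one bracket type occurs).


-- ===== PORT A =====
-- parens = {'(' : ')'}; closing = [')']; stack is a list with its top at the head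
def checkSanityParens : PySem.Dict Char Char := PySem.Dict.ofList [('(', ')')]

def checkSanityLoop (stack : List Char) : List Char → Option (List Char)
  | [] => some stack
  | c :: rest =>
    match checkSanityParens.get? c with
    | some d => checkSanityLoop (d :: stack) rest
    | none =>
      if c ∈ [')'] then
        match stack with
        | [] => none
        | top :: s' => if c ≠ top then none else checkSanityLoop s' rest
      else checkSanityLoop stack rest

def checkSanity (line : String) : Bool :=
  if !(PySem.Str.isIn "@prio" line) || !(PySem.Str.isIn "@start" line) then false
  else
    match checkSanityLoop [] line.toList with
    | none => false
    | some stack => stack.isEmpty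

-- ===== PORT B =====
def checkSanityAltLoop (balance : Nat) : List Char → Option Nat
  | [] => some balance
  | c :: rest =>
    if c = '(' then checkSanityAltLoop (balance + 1) rest
    else if c = ')' then
      if balance = 0 then none else checkSanityAltLoop (balance - 1) rest
    else checkSanityAltLoop balance rest

def checkSanity_alt (line : String) : Bool :=
  if !(PySem.Str.isIn "@prio" line) || !(PySem.Str.isIn "@start" line) then false
  else
    match checkSanityAltLoop 0 line.toList with
    | none => false
    | some balance => balance == 0

-- ===== PRECONDITION & SPEC =====
def Spec_checkSanity (line : String) (out : Bool) : Prop := out = checkSanity_alt line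
instance (line : String) (out : Bool) : Decidable (Spec_checkSanity line out) := by unfold Spec_checkSanity; infer_instance

-- ===== CLAIM (what is proved, stated in full; the proofs are below) =====
def Claim_equal_checkSanity : Prop := ∀ (line : String), Dom_checkSanity line → Spec_checkSanity line (checkSanity line)

-- ===== LEMMAS AND PROOFS =====
lemma checkSanityParens_get? (c : Char) :
    checkSanityParens.get? c = if c = '(' then some ')' else none := by
  by_cases h : c = '('
  · subst h; decide
  · simp [checkSanityParens, PySem.Dict.ofList, PySem.Dict.update, PySem.Dict.empty,
      PySem.Dict.insert, PySem.Dict.get?, h, Ne.symm h]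

lemma checkSanityLoop_eq (rest : List Char) : ∀ n : Nat,
    checkSanityLoop (List.replicate n ')') rest
      = (checkSanityAltLoop n rest).map (fun m => List.replicate m ')') := by
  induction rest with
  | nil => intro n; simp [checkSanityLoop, checkSanityAltLoop]
  | cons c rest ih =>
    intro n
    by_cases hc : c = '('
    · simpa [checkSanityLoop, checkSanityAltLoop, checkSanityParens_get?, hc,
        ← List.replicate_succ] using ih (n + 1)
    · by_cases hc' : c = ')'
      · cases n with
        | zero => simp [checkSanityLoop, checkSanityAltLoop, checkSanityParens_get?, hc']
        | succ m =>
          simpa [checkSanityLoop, checkSanityAltLoop, checkSanityParens_get?, hc, hc',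
            List.replicate_succ] using ih m
      · simpa [checkSanityLoop, checkSanityAltLoop, checkSanityParens_get?, hc, hc'] using ih n

-- ===== VERDICT (by name: the statement is the Claim_ definition above) =====
theorem checkSanity_spec : Claim_equal_checkSanity := by
  intro line _
  unfold Spec_checkSanity checkSanity checkSanity_alt
  split
  · rfl
  · have h := checkSanityLoop_eq line.toList 0
    simp only [List.replicate_zero] at h
    rw [h]
    cases checkSanityAltLoop 0 line.toList with
    | none => rfl
    | some m => cases m <;> simp [List.replicate_succ]
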